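-- pv_equiv track=rewrite | github.com/Manarabdelgawad/test | app.py | decide_satellite_movement
-- ===== SOURCE A (Python) =====
-- def decide_satellite_movement(objects):
--     if not objects:
--         return "No objects detected, stay in position"
--
--     # Simple decision: Move opposite to the closest object's horizontal position
--     # Prioritize objects in the "left" or "right" to avoid collision
--     for obj in objects:
--         if "left" in obj['position']:
--             return "Move satellite right"
--         elif "right" in obj['position']:
--             return "Move satellite left"
--
--     # If no objects are on left or right, check if any are in center
--     for obj in objects:
--         if obj['position'] == "center":
--             # Could refine further based on vertical position or size
--             return "Move satellite slightly right"  # Arbitrary choice, can adjust logic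
--
--     # Default: No critical objects in horizontal extremes or center
--     return "Stay in position"
-- ===== SOURCE B (Python) =====
-- def decide_satellite_movement(objects):
--     if not objects:
--         return "No objects detected, stay in position"
--     center_seen = False
--     for obj in objects:
--         pos = obj['position']
--         if "left" in pos:
--             return "Move satellite right"
--         if "right" in pos:
--             return "Move satellite left"
--         if pos == "center":
--             center_seen = True
--     return "Move satellite slightly right" if center_seen else "Stay in position"
-- ===== Notes on version B (the rewrite author's own statement) =====
-- stated objective: simpler
-- what changed: A's two sequential passes (one for left/right, one for center) are collapsed into a single pass that maintains a center_seen flag, deciding the center case after the loop.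
import Mathlib
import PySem

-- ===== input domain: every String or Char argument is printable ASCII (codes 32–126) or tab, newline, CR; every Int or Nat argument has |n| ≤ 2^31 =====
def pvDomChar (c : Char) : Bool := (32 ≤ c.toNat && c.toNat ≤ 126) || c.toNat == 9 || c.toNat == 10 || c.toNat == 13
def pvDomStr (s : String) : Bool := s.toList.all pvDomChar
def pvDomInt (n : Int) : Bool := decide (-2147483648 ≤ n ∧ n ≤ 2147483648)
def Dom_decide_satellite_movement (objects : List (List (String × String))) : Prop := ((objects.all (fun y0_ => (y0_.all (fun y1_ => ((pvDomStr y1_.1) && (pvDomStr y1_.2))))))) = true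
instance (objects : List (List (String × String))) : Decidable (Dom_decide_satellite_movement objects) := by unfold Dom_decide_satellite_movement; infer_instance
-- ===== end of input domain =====

-- B collapses A's two sequential passes into one pass with a center_seen flag (objective: simpler).

-- ===== PORT A =====
-- obj['position'] (KeyError where the key is missing — excluded by Pre_; getD '' is only reached outside Pre_)
def pvPos (obj : List (String × String)) : String :=
  PySem.Dict.getD (PySem.Dict.mk obj) "position" ""

-- first for-loop of A: return on the first object whose position contains "left"/"right"
def pvLoop1 : List (List (String × String)) → Option String
  | [] => none
  | obj :: rest =>
    if PySem.Str.isIn "left" (pvPos obj) then some "Move satellite right"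
    else if PySem.Str.isIn "right" (pvPos obj) then some "Move satellite left"
    else pvLoop1 rest

-- second for-loop of A: return on the first object whose position equals "center"
def pvLoop2 : List (List (String × String)) → Option String
  | [] => none
  | obj :: rest =>
    if pvPos obj == "center" then some "Move satellite slightly right"
    else pvLoop2 rest

def decide_satellite_movement (objects : List (List (String × String))) : String :=
  if objects.isEmpty then "No objects detected, stay in position"
  else
    match pvLoop1 objects with
    | some r => r
    | none =>
      match pvLoop2 objects with
      | some r => r
      | none => "Stay in position"

-- ===== PORT B =====
-- single pass maintaining the center_seen flag
def pvBLoop : List (List (String × String)) → Bool → String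
  | [], centerSeen =>
    if centerSeen then "Move satellite slightly right" else "Stay in position"
  | obj :: rest, centerSeen =>
    let pos := pvPos obj
    if PySem.Str.isIn "left" pos then "Move satellite right"
    else if PySem.Str.isIn "right" pos then "Move satellite left"
    else pvBLoop rest (centerSeen || pos == "center")

def decide_satellite_movement_alt (objects : List (List (String × String))) : String :=
  if objects.isEmpty then "No objects detected, stay in position"
  else pvBLoop objects false

-- ===== PRECONDITION & SPEC =====
-- does the object dict carry the key "position"? (obj['position'] raises KeyError otherwise)
def pvHasPos (obj : List (String × String)) : Bool :=
  (obj.map Prod.fst).contains "position"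

-- does the object's position contain "left" or "right" (making A return early)?
def pvTrig (obj : List (String × String)) : Bool :=
  pvHasPos obj &&
    (PySem.Str.isIn "left" (PySem.Dict.getD (PySem.Dict.mk obj) "position" "") ||
     PySem.Str.isIn "right" (PySem.Dict.getD (PySem.Dict.mk obj) "position" ""))

-- Pre_ excludes exactly the inputs where Python A raises KeyError: some object lacking the
-- "position" key is reached, i.e. it is not preceded by a left/right-triggering object.
def Pre_decide_satellite_movement (objects : List (List (String × String))) : Prop :=
  ∀ i, i < objects.length → pvHasPos (objects.getD i []) = false →
    ∃ j, j < i ∧ pvTrig (objects.getD j []) = true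
instance (objects : List (List (String × String))) : Decidable (Pre_decide_satellite_movement objects) := by unfold Pre_decide_satellite_movement; infer_instance

def pvWitness_decide_satellite_movement : (List (List (String × String))) :=
  [[("position", "left of us")], [("position", "center")]]

def Spec_decide_satellite_movement (objects : List (List (String × String))) (out : String) : Prop := out = decide_satellite_movement_alt objects
instance (objects : List (List (String × String))) (out : String) : Decidable (Spec_decide_satellite_movement objects out) := by unfold Spec_decide_satellite_movement; infer_instance

-- ===== CLAIM (what is proved, stated in full; the proofs are below) =====
def Claim_equal_decide_satellite_movement : Prop := ∀ (objects : List (List (String × String))), Dom_decide_satellite_movement objects → Pre_decide_satellite_movement objects → Spec_decide_satellite_movement objects (decide_satellite_movement objects)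

-- ===== LEMMAS AND PROOFS =====

-- pvLoop2 only ever produces the one string
lemma pvLoop2_cases (objects : List (List (String × String))) :
    pvLoop2 objects = none ∨ pvLoop2 objects = some "Move satellite slightly right" := by
  induction objects with
  | nil => exact Or.inl rfl
  | cons obj rest ih =>
    simp only [pvLoop2]
    split
    · exact Or.inr rfl
    · exact ih

-- B's single pass equals A's two passes, for any accumulated flag
lemma pvBLoop_eq (objects : List (List (String × String))) (c : Bool) :
    pvBLoop objects c =
      match pvLoop1 objects with
      | some r => r
      | none =>
        if c || (pvLoop2 objects).isSome then "Move satellite slightly right"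
        else "Stay in position" := by
  induction objects generalizing c with
  | nil => cases c <;> simp [pvBLoop, pvLoop1, pvLoop2]
  | cons obj rest ih =>
    simp only [pvBLoop, pvLoop1, pvLoop2]
    split
    · rfl
    · split
      · rfl
      · rw [ih]
        rcases h1 : pvLoop1 rest with _ | r
        · cases c <;> by_cases hc : pvPos obj == "center" <;>
            simp [hc]
        · rfl

-- ===== VERDICT (by name: the statement is the Claim_ definition above) =====
theorem decide_satellite_movement_spec : Claim_equal_decide_satellite_movement := by
  intro objects _ _
  unfold Spec_decide_satellite_movement decide_satellite_movement decide_satellite_movement_alt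
  split
  · rfl
  · rw [pvBLoop_eq]
    rcases h1 : pvLoop1 objects with _ | r
    · rcases pvLoop2_cases objects with h2 | h2 <;> simp [h2]
    · rfl
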